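/- GENERATED by farm/mkstatement.py from design/units.tsv (unit `vorbis_init`) and the Specs of Vorbis/Spec/*.lean — do not edit.
   THE STATEMENT of the proof unit `vorbis_init`: the function `vorbis_init` (43 instructions) satisfies its contract,
   given the contracts of its callees. What the names mean: Vorbis/Spec/Basic.lean. The theorem to prove:
   `theorem vorbis_init_ok : Vorbis.Spec.vorbis_init.Statement`. -/
import Vorbis.Spec.Alloc
import Vorbis.Spec.Libc
import Vorbis.Spec.Runtime
namespace Vorbis.Spec.vorbis_init
open X86 X86.User Asan

/-- The statement of unit `vorbis_init`. -/
def Statement : Prop :=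
  ∀ (Lay : Layout) (_hLay : Lay.hi = 0x1000000) (μ : Microarch) (_hμ : UserX.MicroOK μ) (u₀ : State)
    (_hcode : HasCodeNat Lay u₀ Vorbis.L.vorbis_init.entry Vorbis.Code.code_vorbis_init.nat Vorbis.L.vorbis_init.size)
    (_h_memset : ∀ (others : List Obj) (frames : List (Nat × FrameLayout)), Calls Lay μ Vorbis.WayInv (Vorbis.conv u₀) Vorbis.L.memset.entry (Vorbis.Spec.memset.spec others frames))
    (_h_asan_store16_noabort : Calls Lay μ Vorbis.WayInv (Vorbis.conv u₀) Vorbis.L.__asan_store16_noabort.entry Asan.check16Spec)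
    (_h_asan_load16_noabort : Calls Lay μ Vorbis.WayInv (Vorbis.conv u₀) Vorbis.L.__asan_load16_noabort.entry Asan.check16Spec)
    (_h_asan_load4_noabort : Asan.SmallCheck Lay μ Vorbis.WayInv (Vorbis.CodeOK u₀) [.rax, .rcx, .rdx] 4 Vorbis.L.__asan_load4_noabort.entry)
    (_h_asan_store4_noabort : Asan.SmallCheck Lay μ Vorbis.WayInv (Vorbis.CodeOK u₀) [.rax, .rcx, .rdx] 4 Vorbis.L.__asan_store4_noabort.entry)
    (_h_asan_store8_noabort : Asan.SmallCheck Lay μ Vorbis.WayInv (Vorbis.CodeOK u₀) [.rax, .rcx, .rdx] 8 Vorbis.L.__asan_store8_noabort.entry),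
    ∀ (others : List Obj) (frames : List (Nat × FrameLayout)) (B len : Nat), Calls Lay μ Vorbis.WayInv (Vorbis.conv u₀) Vorbis.L.vorbis_init.entry (Vorbis.Spec.vorbis_init.spec others frames B len)

end Vorbis.Spec.vorbis_init
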